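-- pv_equiv track=rewrite | github.com/nfrith/pals | language-upgrades/fixtures/v1/.als/modules/evaluations/v2/migrations/migrate_from_v1.py | rewrite_frontmatter
-- ===== SOURCE A (Python) =====
-- OWNER_BY_CATEGORY = {
--     "infrastructure": "platform-infra",
--     "tooling": "developer-experience",
--     "vendor": "platform-operations",
--     "library": "developer-experience",
-- }
--
-- def rewrite_frontmatter(frontmatter_lines: list[str]) -> tuple[list[str], bool]:
--     updated: list[str] = []
--     changed = False
--     category: str | None = None
--     saw_owner = False
--
--     for line in frontmatter_lines:
--         if line.startswith("category: "):
--             category = line.split(": ", 1)[1]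
--             updated.append(line)
--             continue
--
--         if line.startswith("owner: "):
--             saw_owner = True
--             updated.append(line)
--             continue
--
--         if line.startswith("decision: "):
--             updated.append(line.replace("decision:", "outcome:", 1))
--             changed = True
--             continue
--
--         updated.append(line)
--
--     if not saw_owner:
--         if category is None:
--             raise ValueError("record is missing required category field for owner backfill")
--         owner = OWNER_BY_CATEGORY.get(category, "governance")
--         insert_at = next(
--             (index + 1 for index, line in enumerate(updated) if line.startswith("category: ")),
--             len(updated),
--         )
--         updated.insert(insert_at, f"owner: {owner}")
--         changed = True
--
--     return updated, changed
-- ===== SOURCE B (Python) =====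
-- OWNER_BY_CATEGORY = {
--     "infrastructure": "platform-infra",
--     "tooling": "developer-experience",
--     "vendor": "platform-operations",
--     "library": "developer-experience",
-- }
--
--
-- def rewrite_frontmatter(frontmatter_lines: list[str]) -> tuple[list[str], bool]:
--     updated = [
--         "outcome:" + line[len("decision:"):] if line.startswith("decision: ") else line
--         for line in frontmatter_lines
--     ]
--     changed = any(line.startswith("decision: ") for line in frontmatter_lines)
--
--     if not any(line.startswith("owner: ") for line in frontmatter_lines):
--         categories = [
--             line[len("category: "):]
--             for line in frontmatter_lines
--             if line.startswith("category: ")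
--         ]
--         if not categories:
--             raise ValueError("record is missing required category field for owner backfill")
--         owner = OWNER_BY_CATEGORY.get(categories[-1], "governance")
--         insert_at = next(
--             (i + 1 for i, line in enumerate(frontmatter_lines) if line.startswith("category: ")),
--             len(frontmatter_lines),
--         )
--         updated.insert(insert_at, f"owner: {owner}")
--         changed = True
--
--     return updated, changed
-- ===== Notes on version B (the rewrite author's own statement) =====
-- stated objective: simpler
-- what changed: Replaced A's single loop that threads four pieces of state (updated list, changed flag, last category, owner flag) with independent whole-list passes: a comprehension for the rewrite, any() for the changed/owner checks, and a filter for the category values.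
import Mathlib
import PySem

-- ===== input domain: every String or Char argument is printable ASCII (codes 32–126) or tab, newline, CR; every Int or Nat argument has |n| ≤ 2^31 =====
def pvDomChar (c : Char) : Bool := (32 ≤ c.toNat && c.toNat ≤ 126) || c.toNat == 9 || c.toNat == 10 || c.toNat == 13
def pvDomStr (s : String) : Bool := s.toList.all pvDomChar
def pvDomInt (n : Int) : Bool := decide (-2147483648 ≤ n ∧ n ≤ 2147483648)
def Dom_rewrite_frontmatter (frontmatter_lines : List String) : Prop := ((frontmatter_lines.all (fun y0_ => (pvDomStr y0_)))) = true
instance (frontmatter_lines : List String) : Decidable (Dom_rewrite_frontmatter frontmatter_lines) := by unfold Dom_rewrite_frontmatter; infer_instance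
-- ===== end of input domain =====

-- B rewrites 'decision:' lines and checks for an owner line in separate whole-list passes
-- (map/any/filter) instead of A's single accumulating four-field loop; objective: simpler.

-- ===== PORT A =====

def OWNER_BY_CATEGORY : PySem.Dict String String :=
  PySem.Dict.ofList
    [("infrastructure", "platform-infra"),
     ("tooling", "developer-experience"),
     ("vendor", "platform-operations"),
     ("library", "developer-experience")]

-- line.split(": ", 1)[1] on a line starting with "category: ": the first ": " in such a
-- line is at index 8, so the second piece is line[10:] — exact there (hand port).
def pvCatValue (line : String) : String := String.ofList (line.toList.drop 10)

-- line.replace("decision:", "outcome:", 1) on a line starting with "decision: ": the first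
-- occurrence of "decision:" is the 9-char prefix, so the result is "outcome:" + line[9:] — exact there (hand port).
def pvDecRewrite (line : String) : String := String.ofList ("outcome:".toList ++ line.toList.drop 9)

-- the body of A's for-loop: state (updated, changed, category, saw_owner), branches in A's order
def pvStepA (st : List String × Bool × Option String × Bool) (line : String) :
    List String × Bool × Option String × Bool :=
  let (updated, changed, category, saw_owner) := st
  if PySem.Str.startswith line "category: " then
    (updated ++ [line], changed, some (pvCatValue line), saw_owner)
  else if PySem.Str.startswith line "owner: " then
    (updated ++ [line], changed, category, true)
  else if PySem.Str.startswith line "decision: " then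
    (updated ++ [pvDecRewrite line], true, category, saw_owner)
  else
    (updated ++ [line], changed, category, saw_owner)

def rewrite_frontmatter (frontmatter_lines : List String) : List String × Bool :=
  let st := frontmatter_lines.foldl pvStepA ([], false, none, false)
  let (updated, changed, category, saw_owner) := st
  if !saw_owner then
    match category with
    | none => ([], false)  -- raise ValueError — excluded by Pre_
    | some cat =>
      let owner := PySem.Dict.getD OWNER_BY_CATEGORY cat "governance"
      -- next((index + 1 for index, line in enumerate(updated) if line.startswith("category: ")), len(updated))
      let insert_at : Int :=
        match updated.findIdx? (fun l => PySem.Str.startswith l "category: ") with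
        | some i => (i : Int) + 1
        | none => (updated.length : Int)
      (PySem.List.insert updated insert_at (String.ofList ("owner: ".toList ++ owner.toList)), true)
  else
    (updated, changed)

-- ===== PORT B =====

def rewrite_frontmatter_alt (frontmatter_lines : List String) : List String × Bool :=
  let updated := frontmatter_lines.map
    (fun line => if PySem.Str.startswith line "decision: " then pvDecRewrite line else line)
  let changed := frontmatter_lines.any (fun line => PySem.Str.startswith line "decision: ")
  if !(frontmatter_lines.any (fun line => PySem.Str.startswith line "owner: ")) then
    let categories :=
      (frontmatter_lines.filter (fun line => PySem.Str.startswith line "category: ")).map pvCatValue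
    match categories.getLast? with
    | none => ([], false)  -- raise ValueError — excluded by Pre_
    | some cat =>
      let owner := PySem.Dict.getD OWNER_BY_CATEGORY cat "governance"
      let insert_at : Int :=
        match frontmatter_lines.findIdx? (fun line => PySem.Str.startswith line "category: ") with
        | some i => (i : Int) + 1
        | none => (frontmatter_lines.length : Int)
      (PySem.List.insert updated insert_at (String.ofList ("owner: ".toList ++ owner.toList)), true)
  else
    (updated, changed)

-- ===== PRECONDITION & SPEC =====
-- A (and B) raise ValueError on inputs with no "owner: " line and no "category: " line;
-- Pre_ excludes exactly those.
def Pre_rewrite_frontmatter (frontmatter_lines : List String) : Prop :=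
  (frontmatter_lines.any (fun line => PySem.Str.startswith line "owner: ")
    || frontmatter_lines.any (fun line => PySem.Str.startswith line "category: ")) = true
instance (frontmatter_lines : List String) : Decidable (Pre_rewrite_frontmatter frontmatter_lines) := by
  unfold Pre_rewrite_frontmatter; infer_instance

def pvWitness_rewrite_frontmatter : List String :=
  ["title: t", "category: tooling", "decision: keep"]

def Spec_rewrite_frontmatter (frontmatter_lines : List String) (out : List String × Bool) : Prop := out = rewrite_frontmatter_alt frontmatter_lines
instance (frontmatter_lines : List String) (out : List String × Bool) : Decidable (Spec_rewrite_frontmatter frontmatter_lines out) := by unfold Spec_rewrite_frontmatter; infer_instance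

-- ===== CLAIM (what is proved, stated in full; the proofs are below) =====
def Claim_equal_rewrite_frontmatter : Prop := ∀ (frontmatter_lines : List String), Dom_rewrite_frontmatter frontmatter_lines → Pre_rewrite_frontmatter frontmatter_lines → Spec_rewrite_frontmatter frontmatter_lines (rewrite_frontmatter frontmatter_lines)

-- ===== LEMMAS AND PROOFS =====

-- two prefixes with different first characters cannot both be prefixes of the same line
theorem pvPrefixExcl (l : String) (a b : Char) (p q : List Char) (hab : a ≠ b)
    (hp : PySem.Chars.startswith l.toList (a :: p) = true) :
    PySem.Chars.startswith l.toList (b :: q) = false := by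
  rw [PySem.Chars.startswith_iff] at hp
  obtain ⟨t, ht⟩ := hp
  rw [Bool.eq_false_iff, Ne, PySem.Chars.startswith_iff]
  rintro ⟨u, hu⟩
  rw [← ht, List.cons_append, List.cons_append, List.cons.injEq] at hu
  exact hab hu.1.symm

theorem pvCatList : "category: ".toList = 'c' :: "ategory: ".toList := by decide
theorem pvDecList : "decision: ".toList = 'd' :: "ecision: ".toList := by decide
theorem pvOwnList : "owner: ".toList = 'o' :: "wner: ".toList := by decide

theorem pvCatNotDec (l : String) (h : PySem.Str.startswith l "category: " = true) :
    PySem.Str.startswith l "decision: " = false := by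
  rw [PySem.Str.startswith_eq, pvCatList] at h
  rw [PySem.Str.startswith_eq, pvDecList]
  exact pvPrefixExcl l 'c' 'd' _ _ (by decide) h

theorem pvCatNotOwn (l : String) (h : PySem.Str.startswith l "category: " = true) :
    PySem.Str.startswith l "owner: " = false := by
  rw [PySem.Str.startswith_eq, pvCatList] at h
  rw [PySem.Str.startswith_eq, pvOwnList]
  exact pvPrefixExcl l 'c' 'o' _ _ (by decide) h

theorem pvOwnNotDec (l : String) (h : PySem.Str.startswith l "owner: " = true) :
    PySem.Str.startswith l "decision: " = false := by
  rw [PySem.Str.startswith_eq, pvOwnList] at h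
  rw [PySem.Str.startswith_eq, pvDecList]
  exact pvPrefixExcl l 'o' 'd' _ _ (by decide) h

-- A "decision: " line's rewrite is not a "category: " line, and neither is the line itself,
-- so the per-line rewrite preserves the "category: " test.
theorem pvPredMap (l : String) :
    PySem.Str.startswith (if PySem.Str.startswith l "decision: " then pvDecRewrite l else l)
      "category: "
    = PySem.Str.startswith l "category: " := by
  by_cases h : PySem.Str.startswith l "decision: " = true
  · rw [if_pos h]
    have h1 : PySem.Str.startswith (pvDecRewrite l) "category: " = false := by
      rw [PySem.Str.startswith_eq, pvCatList]
      have : (pvDecRewrite l).toList = 'o' :: ("utcome:".toList ++ l.toList.drop 9) := by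
        simp only [pvDecRewrite, String.toList_ofList]
        rw [show "outcome:".toList = 'o' :: "utcome:".toList from by decide, List.cons_append]
      rw [Bool.eq_false_iff, Ne, PySem.Chars.startswith_iff, this]
      rintro ⟨u, hu⟩
      rw [List.cons_append, List.cons.injEq] at hu
      exact absurd hu.1 (by decide)
    have h2 : PySem.Str.startswith l "category: " = false := by
      rw [PySem.Str.startswith_eq, pvDecList] at h
      rw [PySem.Str.startswith_eq, pvCatList]
      exact pvPrefixExcl l 'd' 'c' _ _ (by decide) h
    rw [h1, h2]
  · rw [if_neg h]

theorem pvLastOr {α : Type} (a : α) (l : List α) (c : Option α) :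
    Option.or ((a :: l).getLast?) c = Option.or l.getLast? (some a) := by
  cases l with
  | nil => simp
  | cons b m =>
    rw [List.getLast?_cons_cons]
    cases h : (b :: m).getLast? with
    | none => simp [List.getLast?_eq_none_iff] at h
    | some x => simp

-- Characterisation of A's loop state after folding over ls from an arbitrary start state.
theorem pvFoldA (ls : List String) (u0 : List String) (c0 : Bool) (cat0 : Option String) (o0 : Bool) :
    ls.foldl pvStepA (u0, c0, cat0, o0)
    = (u0 ++ ls.map (fun l => if PySem.Str.startswith l "decision: " then pvDecRewrite l else l),
       c0 || ls.any (fun l => PySem.Str.startswith l "decision: "),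
       Option.or (((ls.filter (fun l => PySem.Str.startswith l "category: ")).map pvCatValue).getLast?) cat0,
       o0 || ls.any (fun l => PySem.Str.startswith l "owner: ")) := by
  induction ls generalizing u0 c0 cat0 o0 with
  | nil => simp
  | cons hd tl ih =>
    rw [List.foldl_cons]
    simp only [List.map_cons, List.any_cons, List.filter_cons]
    by_cases hcat : PySem.Str.startswith hd "category: " = true
    · have hdec := pvCatNotDec hd hcat
      have hown := pvCatNotOwn hd hcat
      have hdec' : ¬ (PySem.Str.startswith hd "decision: " = true) := by
        rw [hdec]; exact Bool.false_ne_true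
      have hstep : pvStepA (u0, c0, cat0, o0) hd = (u0 ++ [hd], c0, some (pvCatValue hd), o0) := by
        simp only [pvStepA]; rw [if_pos hcat]
      rw [hstep, ih, Prod.mk.injEq, Prod.mk.injEq, Prod.mk.injEq]
      refine ⟨?_, ?_, ?_, ?_⟩
      · rw [if_neg hdec']
        simp only [List.append_assoc, List.singleton_append]
      · rw [hdec, Bool.false_or]
      · rw [if_pos hcat, List.map_cons, pvLastOr]
      · rw [hown, Bool.false_or]
    · by_cases hown : PySem.Str.startswith hd "owner: " = true
      · have hdec := pvOwnNotDec hd hown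
        have hdec' : ¬ (PySem.Str.startswith hd "decision: " = true) := by
          rw [hdec]; exact Bool.false_ne_true
        have hstep : pvStepA (u0, c0, cat0, o0) hd = (u0 ++ [hd], c0, cat0, true) := by
          simp only [pvStepA]; rw [if_neg hcat, if_pos hown]
        rw [hstep, ih, Prod.mk.injEq, Prod.mk.injEq, Prod.mk.injEq]
        refine ⟨?_, ?_, ?_, ?_⟩
        · rw [if_neg hdec']
          simp only [List.append_assoc, List.singleton_append]
        · rw [hdec, Bool.false_or]
        · rw [if_neg hcat]
        · rw [hown]
          simp only [Bool.true_or, Bool.or_true]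
      · by_cases hdec : PySem.Str.startswith hd "decision: " = true
        · have hstep : pvStepA (u0, c0, cat0, o0) hd = (u0 ++ [pvDecRewrite hd], true, cat0, o0) := by
            simp only [pvStepA]; rw [if_neg hcat, if_neg hown, if_pos hdec]
          rw [hstep, ih, Prod.mk.injEq, Prod.mk.injEq, Prod.mk.injEq]
          simp only [Bool.not_eq_true] at hown
          refine ⟨?_, ?_, ?_, ?_⟩
          · rw [if_pos hdec]
            simp only [List.append_assoc, List.singleton_append]
          · rw [hdec]
            simp only [Bool.true_or, Bool.or_true]
          · rw [if_neg hcat]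
          · rw [hown, Bool.false_or]
        · have hstep : pvStepA (u0, c0, cat0, o0) hd = (u0 ++ [hd], c0, cat0, o0) := by
            simp only [pvStepA]; rw [if_neg hcat, if_neg hown, if_neg hdec]
          rw [hstep, ih, Prod.mk.injEq, Prod.mk.injEq, Prod.mk.injEq]
          simp only [Bool.not_eq_true] at hown hdec
          refine ⟨?_, ?_, ?_, ?_⟩
          · rw [if_neg (by rw [hdec]; exact Bool.false_ne_true)]
            simp only [List.append_assoc, List.singleton_append]
          · rw [hdec, Bool.false_or]
          · rw [if_neg hcat]
          · rw [hown, Bool.false_or]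

-- findIdx? for the "category: " test is unchanged by the per-line rewrite.
theorem pvFindIdxMap (ls : List String) :
    (ls.map (fun l => if PySem.Str.startswith l "decision: " then pvDecRewrite l else l)).findIdx?
        (fun l => PySem.Str.startswith l "category: ")
    = ls.findIdx? (fun l => PySem.Str.startswith l "category: ") := by
  induction ls with
  | nil => rfl
  | cons hd tl ih =>
    rw [List.map_cons, List.findIdx?_cons, List.findIdx?_cons, pvPredMap hd, ih]

-- ===== VERDICT (by name: the statement is the Claim_ definition above) =====
theorem rewrite_frontmatter_spec : Claim_equal_rewrite_frontmatter := by
  intro ls _ hpre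
  unfold Spec_rewrite_frontmatter rewrite_frontmatter rewrite_frontmatter_alt
  rw [pvFoldA]
  simp only [Bool.false_or, Option.or_none, List.nil_append]
  by_cases hown : ls.any (fun line => PySem.Str.startswith line "owner: ") = true
  · rw [hown]
    simp only [Bool.not_true, Bool.false_eq_true, if_false]
  · simp only [Bool.not_eq_true] at hown
    rw [hown]
    simp only [Bool.not_false, if_true]
    cases hcat : (((ls.filter (fun l => PySem.Str.startswith l "category: ")).map pvCatValue).getLast?) with
    | none => rfl
    | some cat =>
      simp only []
      rw [pvFindIdxMap, List.length_map]
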